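-- pv_equiv track=rewrite | github.com/recolic/daily-scripts | linuxconf/files/mybin/lib/GetIdleTime-daemon.py | find_last_absolute_active
-- ===== SOURCE A (Python) =====
-- POLL_INTERVAL = 1000 # ms
--
-- def is_active(dp):
--     return dp < POLL_INTERVAL
--
-- def find_last_absolute_active(datapoints):
--     last_idx = 0
--     n = len(datapoints)
--     dps = list(datapoints)
--
--     # window = 4, all active
--     for i in range(n - 3):
--         if all(is_active(dp) for dp in dps[i:i + 4]):
--             last_idx = i + 3
--
--     # window = 8, >=4 active
--     for i in range(n - 7):
--         if sum(is_active(dp) for dp in dps[i:i + 8]) >= 4: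
--             last_idx = max(last_idx, i + 7)
--
--     return last_idx
-- ===== SOURCE B (Python) =====
-- POLL_INTERVAL = 1000 # ms
--
-- def find_last_absolute_active(datapoints):
--     dps = list(datapoints)
--     n = len(dps)
--     # prefix[k] = number of active points among the first k
--     prefix = [0]
--     s = 0
--     for dp in dps:
--         s += 1 if dp < POLL_INTERVAL else 0
--         prefix.append(s)
--     last_idx = 0
--     for i in range(n):
--         if i + 4 <= n and prefix[i + 4] - prefix[i] == 4:
--             last_idx = max(last_idx, i + 3)
--         if i + 8 <= n and prefix[i + 8] - prefix[i] >= 4: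
--             last_idx = max(last_idx, i + 7)
--     return last_idx
-- ===== Notes on version B (the rewrite author's own statement) =====
-- stated objective: faster
-- what changed: Replaces A's two window-rescanning loops (materialising and re-counting each 4- and 8-slice) by a prefix-count table built once and a single combined pass that tests each window with one subtraction and keeps a running max.
import Mathlib
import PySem

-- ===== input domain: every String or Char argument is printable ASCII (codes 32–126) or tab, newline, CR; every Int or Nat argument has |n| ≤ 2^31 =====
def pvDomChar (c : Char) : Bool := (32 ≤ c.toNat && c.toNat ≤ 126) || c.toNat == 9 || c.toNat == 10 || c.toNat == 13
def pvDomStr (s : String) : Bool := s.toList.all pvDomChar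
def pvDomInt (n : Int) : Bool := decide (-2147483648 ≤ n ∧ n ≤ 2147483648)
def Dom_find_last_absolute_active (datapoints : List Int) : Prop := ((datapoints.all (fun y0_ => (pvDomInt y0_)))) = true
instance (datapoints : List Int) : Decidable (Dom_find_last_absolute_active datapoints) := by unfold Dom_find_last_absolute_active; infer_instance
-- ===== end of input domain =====

-- B replaces A's per-window slicing by a prefix-count table and a single combined pass; objective: faster (no per-window slice materialisation/re-counting; measured ~4.8x at n=262144).

-- ===== PORT A =====
def find_last_absolute_active (datapoints : List Int) : Int :=
  let n : Int := PySem.List.len datapoints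
  let dps := datapoints
  let last1 : Int := (PySem.List.pyRange 0 (n - 3) 1).foldl
    (fun last i =>
      if (PySem.List.slice dps (some i) (some (i + 4))).all (fun dp => decide (dp < 1000)) then i + 3
      else last) 0
  (PySem.List.pyRange 0 (n - 7) 1).foldl
    (fun last i =>
      if 4 ≤ ((PySem.List.slice dps (some i) (some (i + 8))).map
          (fun dp => if dp < 1000 then (1 : Int) else 0)).sum
      then max last (i + 7) else last) last1

-- ===== PORT B =====
def find_last_absolute_active_alt (datapoints : List Int) : Int :=
  let dps := datapoints
  let n : Int := PySem.List.len dps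
  let ps := dps.foldl
    (fun (acc : List Int × Int) dp =>
      let s := acc.2 + (if dp < 1000 then (1 : Int) else 0)
      (acc.1 ++ [s], s)) ([0], 0)
  let prefix_ := ps.1
  (PySem.List.pyRange 0 n 1).foldl
    (fun last i =>
      let last1 :=
        if i + 4 ≤ n ∧ PySem.List.pyGetD prefix_ (i + 4) 0 - PySem.List.pyGetD prefix_ i 0 = 4
        then max last (i + 3) else last
      if i + 8 ≤ n ∧ 4 ≤ PySem.List.pyGetD prefix_ (i + 8) 0 - PySem.List.pyGetD prefix_ i 0
      then max last1 (i + 7) else last1) 0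

-- ===== PRECONDITION & SPEC =====
def Spec_find_last_absolute_active (datapoints : List Int) (out : Int) : Prop := out = find_last_absolute_active_alt datapoints
instance (datapoints : List Int) (out : Int) : Decidable (Spec_find_last_absolute_active datapoints out) := by unfold Spec_find_last_absolute_active; infer_instance

-- ===== CLAIM (what is proved, stated in full; the proofs are below) =====
def Claim_equal_find_last_absolute_active : Prop := ∀ (datapoints : List Int), Dom_find_last_absolute_active datapoints → Spec_find_last_absolute_active datapoints (find_last_absolute_active datapoints)

-- ===== LEMMAS AND PROOFS =====

/-- the activity predicate of both programs -/
def actP : Int → Bool := fun dp => decide (dp < 1000)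

/-- number of active points in the window of width `w` starting at `k` -/
def win (dps : List Int) (k w : Nat) : Nat := ((dps.drop k).take w).countP actP

/-- one running-max step guarded by a condition -/
def mstep (c : Nat → Bool) (g : Nat → Int) : Int → Nat → Int :=
  fun last i => if c i then max last (g i) else last

/-- a guarded running-max loop over `range m` -/
def mfold (c : Nat → Bool) (g : Nat → Int) (a : Int) (m : Nat) : Int :=
  (List.range m).foldl (mstep c g) a

theorem foldl_mstep_max (c : Nat → Bool) (g : Nat → Int) :
    ∀ (l : List Nat) (x v : Int),
      l.foldl (mstep c g) (max x v) = max (l.foldl (mstep c g) x) v := by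
  intro l
  induction l with
  | nil => intro x v; rfl
  | cons h t ih =>
    intro x v
    by_cases hc : c h = true
    · simp only [List.foldl_cons, mstep, hc, if_true, max_right_comm x v (g h), ih]
    · simp only [List.foldl_cons, mstep, hc, Bool.false_eq_true, if_false, ih]

theorem mfold_succ (c : Nat → Bool) (g : Nat → Int) (a : Int) (m : Nat) :
    mfold c g a (m + 1) = mstep c g (mfold c g a m) m := by
  simp [mfold, List.range_succ]

theorem split_fold (c4 c8 : Nat → Bool) (g4 g8 : Nat → Int) :
    ∀ (m : Nat) (a : Int),
      (List.range m).foldl (fun last i => mstep c8 g8 (mstep c4 g4 last i) i) a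
        = mfold c8 g8 (mfold c4 g4 a m) m := by
  intro m
  induction m with
  | zero => intro a; rfl
  | succ m ih =>
    intro a
    rw [List.range_succ, List.foldl_append, ih, mfold_succ, mfold_succ]
    have hcomm : ∀ (y : Int),
        mfold c8 g8 (mstep c4 g4 y m) m = mstep c4 g4 (mfold c8 g8 y m) m := by
      intro y
      by_cases hc : c4 m = true
      · simp only [mstep, hc, if_true, mfold, foldl_mstep_max]
      · simp only [mstep, hc, Bool.false_eq_true, if_false]
    simp only [List.foldl_cons, List.foldl_nil, hcomm]

theorem foldl_mstep_id (c : Nat → Bool) (g : Nat → Int) :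
    ∀ (l : List Nat) (a : Int), (∀ i ∈ l, c i = false) → l.foldl (mstep c g) a = a := by
  intro l
  induction l with
  | nil => intro a _; rfl
  | cons h t ih =>
    intro a hall
    have hh := hall h (by simp)
    simp only [List.foldl_cons, mstep, hh, Bool.false_eq_true, if_false]
    exact ih a (fun i hi => hall i (by simp [hi]))

theorem shrink (c c' : Nat → Bool) (g : Nat → Int) (m n : Nat) (hmn : m ≤ n)
    (h : ∀ k, k < n → c' k = if k < m then c k else false) (a : Int) :
    mfold c' g a n = mfold c g a m := by
  unfold mfold
  obtain ⟨d, rfl⟩ : ∃ d, n = m + d := ⟨n - m, by omega⟩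
  rw [List.range_add, List.foldl_append]
  have h1 : (List.range m).foldl (mstep c' g) a = (List.range m).foldl (mstep c g) a := by
    apply List.foldl_ext
    intro x k hk
    have hkm : k < m := List.mem_range.mp hk
    simp only [mstep, h k (by omega), hkm, if_true]
  rw [h1]
  apply foldl_mstep_id
  intro i hi
  simp only [List.mem_map, List.mem_range] at hi
  obtain ⟨x, _, rfl⟩ := hi
  rw [h (m + x) (by omega)]
  simp

theorem asg_fold (c : Nat → Bool) (off : Int) (hoff : 0 ≤ off) :
    ∀ (m : Nat),
      (List.range m).foldl (fun last i => if c i then ((i : Int) + off) else last) 0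
          = mfold c (fun i => (i : Int) + off) 0 m
        ∧ mfold c (fun i => (i : Int) + off) 0 m ≤ (m : Int) + off := by
  intro m
  induction m with
  | zero => exact ⟨rfl, by simpa [mfold] using hoff⟩
  | succ m ih =>
    obtain ⟨ih1, ih2⟩ := ih
    rw [List.range_succ, List.foldl_append, mfold_succ, ih1]
    by_cases hc : c m = true
    · constructor
      · simp only [List.foldl_cons, List.foldl_nil, mstep, hc, if_true]
        exact (max_eq_right ih2).symm
      · simp only [mstep, hc, if_true]
        push_cast
        refine max_le (le_trans ih2 (by omega)) (by omega)
    · constructor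
      · simp only [List.foldl_cons, List.foldl_nil, mstep, hc, Bool.false_eq_true, if_false]
      · simp only [mstep, hc, Bool.false_eq_true, if_false]
        refine le_trans ih2 (by push_cast; omega)

theorem prefix_build :
    ∀ (l p : List Int) (s : Int),
      l.foldl
          (fun (acc : List Int × Int) dp =>
            let s' := acc.2 + (if dp < 1000 then (1 : Int) else 0)
            (acc.1 ++ [s'], s')) (p, s)
        = (p ++ (List.range l.length).map
              (fun k => s + (((l.take (k + 1)).countP actP : Nat) : Int)),
           s + ((l.countP actP : Nat) : Int)) := by
  intro l
  induction l with
  | nil => intro p s; simp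
  | cons x t ih =>
    intro p s
    have hind : (((if actP x then 1 else 0 : Nat) : Int)) = (if x < 1000 then (1 : Int) else 0) := by
      by_cases h : x < 1000 <;> simp [actP, h]
    simp only [List.foldl_cons, ih, Prod.mk.injEq]
    constructor
    · rw [List.length_cons, List.range_succ_eq_map, List.map_cons, List.map_map]
      have hf : ((fun k => s + (((((x :: t).take (k + 1)).countP actP : Nat)) : Int)) ∘ Nat.succ)
          = fun k => (s + (if x < 1000 then (1 : Int) else 0))
              + (((t.take (k + 1)).countP actP : Nat) : Int) := by
        funext k
        simp only [Function.comp_apply, List.take_succ_cons, List.countP_cons]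
        rw [← hind]
        push_cast
        ring
      rw [hf]
      simp only [List.take_succ_cons, List.take_zero, List.countP_cons, List.countP_nil]
      rw [← hind]
      simp [List.append_assoc]
    · simp only [List.countP_cons]
      rw [← hind]
      push_cast
      ring

theorem prefix_getD (dps : List Int) (m : Nat) (hm : m ≤ dps.length) :
    (((0 : Int) :: (List.range dps.length).map
          (fun k => (((dps.take (k + 1)).countP actP : Nat) : Int)))).getD m 0
      = (((dps.take m).countP actP : Nat) : Int) := by
  cases m with
  | zero => simp
  | succ k =>
    have hk : k < dps.length := by omega
    rw [List.getD_cons_succ]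
    rw [List.getD_eq_getElem _ _ (by simpa using hk)]
    simp

theorem win_diff (dps : List Int) (k w : Nat) :
    (((dps.take (k + w)).countP actP : Nat) : Int) - (((dps.take k).countP actP : Nat) : Int)
      = ((win dps k w : Nat) : Int) := by
  unfold win
  rw [List.take_add, List.countP_append]
  push_cast
  ring

theorem all_iff (dps : List Int) (k : Nat) (h : k + 4 ≤ dps.length) :
    (((dps.drop k).take 4).all actP = true) ↔ win dps k 4 = 4 := by
  have hlen : ((dps.drop k).take 4).length = 4 := by
    simp only [List.length_take, List.length_drop]
    omega
  unfold win
  rw [List.all_eq_true, ← List.countP_eq_length (p := actP), hlen]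

/-- A computes: the guarded running-max form over the canonical window conditions. -/
theorem A_eq (dps : List Int) :
    find_last_absolute_active dps
      = mfold (fun k => decide (4 ≤ win dps k 8)) (fun k => (k : Int) + 7)
          (mfold (fun k => decide (win dps k 4 = 4)) (fun k => (k : Int) + 3) 0 (dps.length - 3))
          (dps.length - 7) := by
  have hn3 : ((dps.length : Int) - 3 - 0).toNat = dps.length - 3 := by omega
  have hn7 : ((dps.length : Int) - 7 - 0).toNat = dps.length - 7 := by omega
  simp only [find_last_absolute_active, PySem.List.len_eq]
  rw [PySem.List.pyRange_one, PySem.List.pyRange_one, hn3, hn7, List.foldl_map, List.foldl_map]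
  simp only [zero_add]
  have h4 : ∀ (last : Int), ∀ k ∈ List.range (dps.length - 3),
      (if (PySem.List.slice dps (some ((k : Nat) : Int)) (some (((k : Nat) : Int) + 4))).all
          (fun dp => decide (dp < 1000)) then ((k : Nat) : Int) + 3 else last)
        = (if (fun j => decide (win dps j 4 = 4)) k then ((k : Nat) : Int) + 3 else last) := by
    intro last k hk
    have hk' : k < dps.length - 3 := List.mem_range.mp hk
    have hc4 : k + 4 ≤ dps.length := by omega
    have h2 : (((k : Nat) : Int) + 4) = (((k + 4 : Nat)) : Int) := by push_cast; ring
    rw [h2, PySem.List.slice_natCast]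
    have h3 : k + 4 - k = 4 := by omega
    rw [h3]
    have hcond : (((dps.drop k).take 4).all actP) = decide (win dps k 4 = 4) := by
      rw [Bool.eq_iff_iff, decide_eq_true_eq]
      exact all_iff dps k hc4
    rw [show (fun dp => decide (dp < 1000)) = actP from rfl, hcond]
  rw [List.foldl_ext _ _ _ h4, (asg_fold (fun j => decide (win dps j 4 = 4)) 3 (by norm_num) _).1]
  have h8 : ∀ (last : Int), ∀ k ∈ List.range (dps.length - 7),
      (if 4 ≤ ((PySem.List.slice dps (some ((k : Nat) : Int)) (some (((k : Nat) : Int) + 8))).map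
            (fun dp => if dp < 1000 then (1 : Int) else 0)).sum
        then max last (((k : Nat) : Int) + 7) else last)
        = mstep (fun j => decide (4 ≤ win dps j 8)) (fun j => (j : Int) + 7) last k := by
    intro last k hk
    have h2 : (((k : Nat) : Int) + 8) = (((k + 8 : Nat)) : Int) := by push_cast; ring
    rw [h2, PySem.List.slice_natCast]
    have h3 : k + 8 - k = 8 := by omega
    rw [h3]
    have hmap : (fun dp => if dp < 1000 then (1 : Int) else 0)
        = (fun dp => if actP dp = true then (1 : Int) else 0) := by
      funext dp; by_cases h : dp < 1000 <;> simp [actP, h]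
    rw [hmap, PySem.List.sum_map_ite_one_zero]
    have hiff : (4 ≤ ((((dps.drop k).take 8).countP actP : Nat) : Int)) ↔ (4 ≤ win dps k 8) := by
      unfold win
      exact_mod_cast Iff.rfl
    simp only [mstep, hiff, decide_eq_true_eq]
  rw [List.foldl_ext _ _ _ h8]
  rfl

/-- B computes: the same guarded running-max form. -/
theorem B_eq (dps : List Int) :
    find_last_absolute_active_alt dps
      = mfold (fun k => decide (4 ≤ win dps k 8)) (fun k => (k : Int) + 7)
          (mfold (fun k => decide (win dps k 4 = 4)) (fun k => (k : Int) + 3) 0 (dps.length - 3))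
          (dps.length - 7) := by
  have hn : ((dps.length : Int) - 0).toNat = dps.length := by omega
  simp only [find_last_absolute_active_alt, PySem.List.len_eq]
  rw [prefix_build]
  simp only [List.singleton_append, zero_add]
  rw [PySem.List.pyRange_one, hn, List.foldl_map]
  simp only [zero_add]
  set P : List Int := (0 : Int) :: (List.range dps.length).map
      (fun k => (((dps.take (k + 1)).countP actP : Nat) : Int)) with hP
  have hget : ∀ (m : Nat), m ≤ dps.length →
      PySem.List.pyGetD P ((m : Nat) : Int) 0 = (((dps.take m).countP actP : Nat) : Int) := by
    intro m hm
    rw [PySem.List.pyGetD_natCast, hP, prefix_getD dps m hm]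
  have hB : ∀ (last : Int), ∀ k ∈ List.range dps.length,
      (let last1 :=
        if ((k : Nat) : Int) + 4 ≤ (dps.length : Int) ∧
            PySem.List.pyGetD P (((k : Nat) : Int) + 4) 0 - PySem.List.pyGetD P ((k : Nat) : Int) 0 = 4
        then max last (((k : Nat) : Int) + 3) else last
      if ((k : Nat) : Int) + 8 ≤ (dps.length : Int) ∧
          4 ≤ PySem.List.pyGetD P (((k : Nat) : Int) + 8) 0 - PySem.List.pyGetD P ((k : Nat) : Int) 0
      then max last1 (((k : Nat) : Int) + 7) else last1)
        = mstep (fun j => decide (j + 8 ≤ dps.length) && decide (4 ≤ win dps j 8)) (fun j => (j : Int) + 7)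
            (mstep (fun j => decide (j + 4 ≤ dps.length) && decide (win dps j 4 = 4)) (fun j => (j : Int) + 3) last k) k := by
    intro last k hk
    have hk' : k < dps.length := List.mem_range.mp hk
    have hgk := hget k (by omega)
    have hc4 : (((k : Nat) : Int) + 4 ≤ (dps.length : Int) ∧
          PySem.List.pyGetD P (((k : Nat) : Int) + 4) 0 - PySem.List.pyGetD P ((k : Nat) : Int) 0 = 4)
        ↔ (k + 4 ≤ dps.length ∧ win dps k 4 = 4) := by
      constructor
      · rintro ⟨ha, hb⟩
        have h1 : k + 4 ≤ dps.length := by exact_mod_cast ha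
        refine ⟨h1, ?_⟩
        rw [show (((k : Nat) : Int) + 4) = (((k + 4 : Nat)) : Int) from by push_cast; ring,
          hget (k + 4) h1, hgk, win_diff] at hb
        exact_mod_cast hb
      · rintro ⟨h1, h2⟩
        refine ⟨by exact_mod_cast h1, ?_⟩
        rw [show (((k : Nat) : Int) + 4) = (((k + 4 : Nat)) : Int) from by push_cast; ring,
          hget (k + 4) h1, hgk, win_diff]
        exact_mod_cast h2
    have hc8 : (((k : Nat) : Int) + 8 ≤ (dps.length : Int) ∧
          4 ≤ PySem.List.pyGetD P (((k : Nat) : Int) + 8) 0 - PySem.List.pyGetD P ((k : Nat) : Int) 0)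
        ↔ (k + 8 ≤ dps.length ∧ 4 ≤ win dps k 8) := by
      constructor
      · rintro ⟨ha, hb⟩
        have h1 : k + 8 ≤ dps.length := by exact_mod_cast ha
        refine ⟨h1, ?_⟩
        rw [show (((k : Nat) : Int) + 8) = (((k + 8 : Nat)) : Int) from by push_cast; ring,
          hget (k + 8) h1, hgk, win_diff] at hb
        exact_mod_cast hb
      · rintro ⟨h1, h2⟩
        refine ⟨by exact_mod_cast h1, ?_⟩
        rw [show (((k : Nat) : Int) + 8) = (((k + 8 : Nat)) : Int) from by push_cast; ring,
          hget (k + 8) h1, hgk, win_diff]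
        exact_mod_cast h2
    simp only [hc4, hc8, mstep, Bool.and_eq_true, decide_eq_true_eq]
  rw [List.foldl_ext _ _ _ hB, split_fold]
  have hshrink4 : ∀ (a : Int),
      mfold (fun j => decide (j + 4 ≤ dps.length) && decide (win dps j 4 = 4)) (fun j => (j : Int) + 3) a dps.length
        = mfold (fun j => decide (win dps j 4 = 4)) (fun j => (j : Int) + 3) a (dps.length - 3) := by
    intro a
    refine shrink _ _ _ _ _ (by omega) ?_ a
    intro k hk
    by_cases h4 : k + 4 ≤ dps.length
    · have hlt : k < dps.length - 3 := by omega
      simp [h4, hlt]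
    · have hlt : ¬ k < dps.length - 3 := by omega
      simp [h4, hlt]
  have hshrink8 : ∀ (a : Int),
      mfold (fun j => decide (j + 8 ≤ dps.length) && decide (4 ≤ win dps j 8)) (fun j => (j : Int) + 7) a dps.length
        = mfold (fun j => decide (4 ≤ win dps j 8)) (fun j => (j : Int) + 7) a (dps.length - 7) := by
    intro a
    refine shrink _ _ _ _ _ (by omega) ?_ a
    intro k hk
    by_cases h8 : k + 8 ≤ dps.length
    · have hlt : k < dps.length - 7 := by omega
      simp [h8, hlt]
    · have hlt : ¬ k < dps.length - 7 := by omega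
      simp [h8, hlt]
  rw [hshrink4, hshrink8]

-- ===== VERDICT (by name: the statement is the Claim_ definition above) =====
theorem find_last_absolute_active_spec : Claim_equal_find_last_absolute_active := by
  intro dps _
  unfold Spec_find_last_absolute_active
  rw [A_eq, B_eq]
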